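-- pv_equiv track=rewrite | github.com/chiggum/dibo | src/prelims/color_dialog.py | get_customcolor_ind
-- ===== SOURCE A (Python) =====
-- def get_customcolor_ind(val, vtoc_keys):
--     i = len(vtoc_keys)-1
--     while i > 0:
--         if vtoc_keys[i-1] > val:
--             i = i-1
--         else:
--             break
--     return vtoc_keys[i-1], vtoc_keys[i], val - vtoc_keys[i-1], vtoc_keys[i] - val
-- ===== SOURCE B (Python) =====
-- def get_customcolor_ind(val, vtoc_keys):
--     # single left-to-right pass: i = last position m (1-based over the prefix
--     # vtoc_keys[:-1]) whose key is <= val, else 0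
--     i = 0
--     for m, k in enumerate(vtoc_keys[:-1], 1):
--         if k <= val:
--             i = m
--     return vtoc_keys[i-1], vtoc_keys[i], val - vtoc_keys[i-1], vtoc_keys[i] - val
-- ===== Notes on version B (the rewrite author's own statement) =====
-- stated objective: simpler
-- what changed: A's right-to-left while loop with break is replaced by a single left-to-right pass that keeps the last 1-based position in vtoc_keys[:-1] whose key is <= val (0 if none); the bracketing pair is then read off once.
import Mathlib
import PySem

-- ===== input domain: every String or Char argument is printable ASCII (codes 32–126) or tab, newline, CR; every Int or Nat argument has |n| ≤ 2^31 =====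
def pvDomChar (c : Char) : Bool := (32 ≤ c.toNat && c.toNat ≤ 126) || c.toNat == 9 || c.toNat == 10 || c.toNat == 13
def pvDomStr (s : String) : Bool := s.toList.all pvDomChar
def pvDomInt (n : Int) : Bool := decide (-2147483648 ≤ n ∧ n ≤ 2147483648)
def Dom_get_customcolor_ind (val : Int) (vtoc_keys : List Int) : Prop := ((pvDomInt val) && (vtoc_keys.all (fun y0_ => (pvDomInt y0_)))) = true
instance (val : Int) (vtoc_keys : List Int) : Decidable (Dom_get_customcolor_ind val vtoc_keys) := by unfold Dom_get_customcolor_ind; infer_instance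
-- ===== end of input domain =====

-- B replaces A's right-to-left while/break scan by one left-to-right pass keeping
-- the last qualifying position (objective: simpler); same return value.

-- ===== PORT A =====
-- the while loop: i counts down from len-1 while vtoc_keys[i-1] > val
def pvLoopA (val : Int) (keys : List Int) : Nat → Nat
  | 0 => 0
  | j+1 => if (PySem.List.pyGet? keys (j : Int)).getD 0 > val then pvLoopA val keys j else j+1

def get_customcolor_ind (val : Int) (vtoc_keys : List Int) : List Int :=
  let i : Int := if vtoc_keys.length = 0 then -1 else ((pvLoopA val vtoc_keys (vtoc_keys.length - 1) : Nat) : Int)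
  match PySem.List.pyGet? vtoc_keys (i-1), PySem.List.pyGet? vtoc_keys i with
  | some a, some b => [a, b, val - a, b - val]
  | _, _ => []   -- Python raises IndexError here (empty list); excluded by Pre_

-- ===== PORT B =====
def get_customcolor_ind_alt (val : Int) (vtoc_keys : List Int) : List Int :=
  let i : Int := (PySem.List.enumerate (PySem.List.slice vtoc_keys none (some (-1))) 1).foldl
      (fun acc mk => if mk.2 ≤ val then mk.1 else acc) 0
  match PySem.List.pyGet? vtoc_keys (i-1) with
  | none => []   -- Python raises IndexError here (empty list); excluded by Pre_
  | some a =>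
    match PySem.List.pyGet? vtoc_keys i with
    | none => []
    | some b => [a, b, val - a, b - val]

-- ===== PRECONDITION & SPEC =====
-- A (and B) raise IndexError on the empty list; Pre_ excludes exactly that input.
def Pre_get_customcolor_ind (val : Int) (vtoc_keys : List Int) : Prop := vtoc_keys ≠ []
instance (val : Int) (vtoc_keys : List Int) : Decidable (Pre_get_customcolor_ind val vtoc_keys) := by unfold Pre_get_customcolor_ind; infer_instance
def pvWitness_get_customcolor_ind : Int × List Int := (3, [1, 5, 9])

def Spec_get_customcolor_ind (val : Int) (vtoc_keys : List Int) (out : List Int) : Prop := out = get_customcolor_ind_alt val vtoc_keys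
instance (val : Int) (vtoc_keys : List Int) (out : List Int) : Decidable (Spec_get_customcolor_ind val vtoc_keys out) := by unfold Spec_get_customcolor_ind; infer_instance

-- ===== CLAIM (what is proved, stated in full; the proofs are below) =====
def Claim_equal_get_customcolor_ind : Prop := ∀ (val : Int) (vtoc_keys : List Int), Dom_get_customcolor_ind val vtoc_keys → Pre_get_customcolor_ind val vtoc_keys → Spec_get_customcolor_ind val vtoc_keys (get_customcolor_ind val vtoc_keys)

-- ===== LEMMAS AND PROOFS =====

theorem pv_enumerate_append_singleton (l : List Int) (x : Int) (s : Int) :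
    PySem.List.enumerate (l ++ [x]) s = PySem.List.enumerate l s ++ [(s + l.length, x)] := by
  induction l generalizing s with
  | nil => simp [PySem.List.enumerate_cons, PySem.List.enumerate_nil]
  | cons y ys ih =>
      simp [PySem.List.enumerate_cons, ih (s + 1)]
      ring_nf

-- the two scans compute the same index on every prefix
theorem pv_fold_eq_loop (val : Int) (keys : List Int) (j : Nat)
    (hj : j ≤ keys.dropLast.length) :
    ((PySem.List.enumerate (keys.dropLast.take j) 1).foldl
        (fun acc mk => if mk.2 ≤ val then mk.1 else acc) 0)
      = ((pvLoopA val keys j : Nat) : Int) := by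
  induction j with
  | zero => simp [pvLoopA]
  | succ j ih =>
      have hjlt : j < keys.dropLast.length := by omega
      have hjk : j < keys.length := by
        have := List.length_dropLast (xs := keys); omega
      have htake : keys.dropLast.take (j+1) = keys.dropLast.take j ++ [keys.dropLast[j]] :=
        List.take_succ_eq_append_getElem hjlt
      have hget : keys.dropLast[j] = keys[j] := List.getElem_dropLast ..
      have hlen : (keys.dropLast.take j).length = j := by simp; omega
      rw [htake, pv_enumerate_append_singleton, List.foldl_append,
          ih (by omega)]
      have hpg : PySem.List.pyGet? keys ((j : Nat) : Int) = some keys[j] := by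
        simp [PySem.List.pyGet?_natCast, List.getElem?_eq_getElem hjk]
      simp only [pvLoopA, hpg, Option.getD_some, hget, hlen, List.foldl_cons, List.foldl_nil]
      by_cases h : keys[j] ≤ val
      · simp [h, not_lt.mpr h]
        omega
      · simp [h, lt_of_not_ge h]

-- ===== VERDICT (by name: the statement is the Claim_ definition above) =====
theorem get_customcolor_ind_spec : Claim_equal_get_customcolor_ind := by
  intro val keys _ hpre
  unfold Spec_get_customcolor_ind get_customcolor_ind get_customcolor_ind_alt
  have hne : keys.length ≠ 0 := by
    simpa [List.length_eq_zero_iff] using hpre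
  have hslice : PySem.List.slice keys none (some (-1)) = keys.dropLast :=
    PySem.List.slice_to_neg_one keys
  have hdl : keys.dropLast.length = keys.length - 1 := List.length_dropLast ..
  have := pv_fold_eq_loop val keys keys.dropLast.length (le_refl _)
  rw [List.take_length] at this
  simp only [hslice, this, if_neg hne, hdl]
  cases h1 : PySem.List.pyGet? keys (((pvLoopA val keys (keys.length - 1) : Nat) : Int) - 1) <;>
    cases h2 : PySem.List.pyGet? keys ((pvLoopA val keys (keys.length - 1) : Nat) : Int) <;>
      simp only [h1, h2]
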